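-- pv_equiv track=rewrite | github.com/kunzhang1110/COMP9021-Principles-of-Programming | Quiz/Quiz 2/quiz_2.py | code_derived_set
-- ===== SOURCE A (Python) =====
-- def code_derived_set(encoded_set):
--     encoded_running_sum = 0
--     # For "encoded_set" coding {e_1, e_2, ..., e_n},
--     # listed in increasing order,
--     # running_sums will eventually be the list
--     # [e_1, e_1 + e_2, e_1 + e_2 + e_3, ... e_1 + ... + e_n]
--     running_sums = []
--     # Will successively take the values
--     # e_1, e_1 + e_2, e_1 + e_2 + e_3, ... e_1 + ... + e_n,
--     # appended to running_sums
--     running_sum = 0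
--     # As done in display_encoded_set()...
--     encoded_set = bin(encoded_set)[2 :][: : -1]
--     for i in range(len(encoded_set) // 2 * 2 - 1, -1, -2):
--         if encoded_set[i] == '1':
--             running_sum += -(i + 1) // 2
--             running_sums.append(running_sum)
--     for i in range(0, len(encoded_set) , 2):
--         if encoded_set[i] == '1':
--             running_sum += i// 2
--             running_sums.append(running_sum)
--     # Encode the running_sums back to decimal integer
--     running_sums = set(running_sums)    # eliminate duplicates
--     list(running_sums).sort()           # sort in increasing order
--     bin_index = []                      #the index in bin_code that has 1
--     for i in running_sums:
--         if i >= 0: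
--             bin_index.append(2*i)
--         else:
--             bin_index.append(-2*i-1)
--     if bin_index == []:
--         return encoded_running_sum
--     bin_code = [0]*(max(bin_index)+1)                    #create bin code with all 0
--     for i in bin_index:
--         bin_code[i] = 1
--     bin_code = bin_code[::-1]                            #reverse the list
--     bin_code = "".join(str(x) for x in bin_code)        #convert to string
--     encoded_running_sum = int(bin_code,2)                #covert back to decimal
--
--     return encoded_running_sum
-- ===== SOURCE B (Python) =====
-- def code_derived_set(encoded_set):
--     # For each element of the decoded set independently, its running sum equals the
--     # sum of ALL decoded elements that are <= it: no sorting, no ordered accumulation.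
--     n = abs(encoded_set)
--     b = n.bit_length()
--     def elem(i):
--         return i // 2 if i % 2 == 0 else -(i + 1) // 2
--     result = 0
--     for i in range(b):
--         if n >> i & 1:
--             e = elem(i)
--             s = 0
--             for j in range(b):
--                 if n >> j & 1 and elem(j) <= e:
--                     s += elem(j)
--             result |= 1 << (2 * s if s >= 0 else -2 * s - 1)
--     return result
-- ===== Notes on version B (the rewrite author's own statement) =====
-- stated objective: alternative
-- what changed: B computes each output bit independently: for every set bit of the input it rescans all bits to sum the decoded elements <= that element and ORs in the corresponding bit, eliminating A's two ordered passes, running accumulator and string-based re-encoding (no sort, no prefix scan).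
import Mathlib
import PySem

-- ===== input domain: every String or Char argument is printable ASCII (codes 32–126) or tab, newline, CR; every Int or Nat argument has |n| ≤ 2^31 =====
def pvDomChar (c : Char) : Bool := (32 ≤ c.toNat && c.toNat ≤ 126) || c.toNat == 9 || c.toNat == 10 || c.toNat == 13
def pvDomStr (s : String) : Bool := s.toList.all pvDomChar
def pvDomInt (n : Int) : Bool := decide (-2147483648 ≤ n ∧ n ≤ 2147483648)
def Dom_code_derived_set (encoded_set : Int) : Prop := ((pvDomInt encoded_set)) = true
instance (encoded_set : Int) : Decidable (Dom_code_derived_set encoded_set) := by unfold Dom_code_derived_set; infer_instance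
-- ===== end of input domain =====

-- B computes every output bit independently: for each set input bit it rescans all
-- bits to sum the decoded elements ≤ that element — no sort, no running accumulator,
-- no string re-assembly (objective: alternative).

-- ===== PORT A =====
-- bin(n) ported by hand (PySem has no bin): '-0b…'/'0b…' with MSB-first digits; exact
def pvMsb (n : Nat) : List Char :=
  if h : n = 0 then [] else pvMsb (n / 2) ++ [if n % 2 = 1 then '1' else '0']
decreasing_by exact Nat.div_lt_self (Nat.pos_of_ne_zero h) (by omega)

def pvBinChars (n : Int) : List Char :=
  if n < 0 then '-' :: '0' :: 'b' :: pvMsb n.natAbs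
  else '0' :: 'b' :: (if n = 0 then ['0'] else pvMsb n.toNat)

-- int(s, 2) ported by hand as the standard digit fold: exact on the nonempty,
-- sign-free, space-free '0'/'1' strings that reach it in this program
def pvParseBin (cs : List Char) : Int :=
  cs.foldl (fun acc c => acc * 2 + (if c = '1' then 1 else 0)) 0

-- encoded_set = bin(encoded_set)[2:][::-1]
def pvStr (n : Int) : List Char :=
  (PySem.List.slice? (PySem.List.slice (pvBinChars n) (some 2) none) none none (-1)).getD []

-- the two running-sum loops of A, in order
def pvLoops (s : List Char) : Int × List Int :=
  let L : Int := (s.length : Int)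
  -- for i in range(len(encoded_set) // 2 * 2 - 1, -1, -2): …
  let st1 := (PySem.List.pyRange (PySem.Int.floordiv L 2 * 2 - 1) (-1) (-2)).foldl
    (fun (st : Int × List Int) i =>
      if PySem.List.pyGet? s i == some '1' then
        (st.1 + PySem.Int.floordiv (-(i + 1)) 2, st.2 ++ [st.1 + PySem.Int.floordiv (-(i + 1)) 2])
      else st) (0, [])
  -- for i in range(0, len(encoded_set), 2): …
  (PySem.List.pyRange 0 L 2).foldl
    (fun (st : Int × List Int) i =>
      if PySem.List.pyGet? s i == some '1' then
        (st.1 + PySem.Int.floordiv i 2, st.2 ++ [st.1 + PySem.Int.floordiv i 2])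
      else st) st1

-- set / bin_index / bin_code / join / int(·, 2) tail of A
def pvEncodeA (rs : List Int) : Int :=
  let running_sums : PySem.Set Int := PySem.Set.ofList rs
  -- list(running_sums).sort() sorts a discarded temporary: no effect
  let bin_index : List Int := running_sums.foldl
    (fun acc i => if 0 ≤ i then acc ++ [2 * i] else acc ++ [-2 * i - 1]) []
  if bin_index = [] then 0
  else
    let mx : Int := (PySem.List.max? bin_index (fun x => x)).getD 0  -- nonempty here: max() cannot raise
    let bc0 : List Int := List.replicate (mx + 1).toNat 0
    let bc1 := bin_index.foldl (fun bc i => PySem.List.pySetD bc i 1) bc0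
    let bc2 := (PySem.List.slice? bc1 none none (-1)).getD []        -- bin_code[::-1]
    pvParseBin (PySem.Str.join "" (bc2.map (fun x => PySem.Int.toStr x))).toList

def code_derived_set (encoded_set : Int) : Int :=
  pvEncodeA (pvLoops (pvStr encoded_set)).2

-- ===== PORT B =====
-- i // 2 if i % 2 == 0 else -(i + 1) // 2
def pvDecode (i : Nat) : Int :=
  if i % 2 = 0 then PySem.Int.floordiv (i : Int) 2 else PySem.Int.floordiv (-((i : Int) + 1)) 2

-- n.bit_length(), ported by hand: number of binary digits of n (0 for 0); exact
def pvBitLen (n : Nat) : Nat :=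
  if h : n = 0 then 0 else pvBitLen (n / 2) + 1
decreasing_by exact Nat.div_lt_self (Nat.pos_of_ne_zero h) (by omega)

def code_derived_set_alt (encoded_set : Int) : Int :=
  let n := encoded_set.natAbs
  let b := pvBitLen n
  (List.range b).foldl
    (fun res i =>
      if (n >>> i) &&& 1 = 1 then
        let e := pvDecode i
        -- s = sum of all decoded elements ≤ e, by a second full scan of the bits
        let s := (List.range b).foldl
          (fun s j => if (n >>> j) &&& 1 = 1 ∧ pvDecode j ≤ e then s + pvDecode j else s) 0
        -- 1 << (2*s if s >= 0 else -2*s-1), the shift ported as a power of two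
        PySem.Int.bor res (if 0 ≤ s then (2:Int) ^ (2*s).toNat else (2:Int) ^ (-2*s-1).toNat)
      else res) 0

-- ===== PRECONDITION & SPEC =====
def Spec_code_derived_set (encoded_set : Int) (out : Int) : Prop := out = code_derived_set_alt encoded_set
instance (encoded_set : Int) (out : Int) : Decidable (Spec_code_derived_set encoded_set out) := by unfold Spec_code_derived_set; infer_instance

-- ===== CLAIM (what is proved, stated in full; the proofs are below) =====
def Claim_equal_code_derived_set : Prop := ∀ (encoded_set : Int), Dom_code_derived_set encoded_set → Spec_code_derived_set encoded_set (code_derived_set encoded_set)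

-- ===== LEMMAS AND PROOFS =====

-- zigzag position of an element / running sum, and its inverse pvDecode
def zigN (t : Int) : Nat := if 0 ≤ t then (2*t).toNat else (-2*t-1).toNat

theorem zig_dec (i : Nat) : zigN (pvDecode i) = i := by
  unfold zigN pvDecode
  simp only [PySem.Int.floordiv_eq_ediv_of_pos (show (0:Int) < 2 by norm_num)]
  split_ifs <;> omega

theorem dec_zig (t : Int) : pvDecode (zigN t) = t := by
  unfold zigN pvDecode
  simp only [PySem.Int.floordiv_eq_ediv_of_pos (show (0:Int) < 2 by norm_num)]
  split_ifs <;> omega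

theorem pvDecode_inj : Function.Injective pvDecode := by
  intro a b hab
  have := congrArg zigN hab
  simpa [zig_dec] using this

-- LSB-first binary digits, = (pvMsb n).reverse
def lsbC (n : Nat) : List Char :=
  if h : n = 0 then [] else (if n % 2 = 1 then '1' else '0') :: lsbC (n / 2)
decreasing_by exact Nat.div_lt_self (Nat.pos_of_ne_zero h) (by omega)

theorem msb_rev (n : Nat) : (pvMsb n).reverse = lsbC n := by
  induction n using Nat.strong_induction_on with
  | _ n ih =>
    rw [pvMsb, lsbC]
    by_cases h : n = 0
    · simp [h]
    · simp only [dif_neg h, List.reverse_append, List.reverse_singleton]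
      rw [ih (n/2) (Nat.div_lt_self (Nat.pos_of_ne_zero h) (by omega))]
      rfl

theorem lsb_get1 (n : Nat) (j : Nat) : (lsbC n)[j]? = some '1' ↔ n.testBit j := by
  induction n using Nat.strong_induction_on generalizing j with
  | _ n ih =>
    rw [lsbC]
    by_cases h : n = 0
    · simp [h]
    · simp only [dif_neg h]
      cases j with
      | zero =>
        simp only [List.getElem?_cons_zero, Nat.testBit_zero]
        rcases Nat.mod_two_eq_zero_or_one n with hp | hp <;> simp [hp]
      | succ j =>
        simp only [List.getElem?_cons_succ, Nat.testBit_succ]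
        exact ih (n/2) (Nat.div_lt_self (Nat.pos_of_ne_zero h) (by omega)) j

theorem lsb_lt (n : Nat) : n < 2 ^ (lsbC n).length := by
  induction n using Nat.strong_induction_on with
  | _ n ih =>
    rw [lsbC]
    by_cases h : n = 0
    · simp [h]
    · simp only [dif_neg h, List.length_cons]
      have := ih (n/2) (Nat.div_lt_self (Nat.pos_of_ne_zero h) (by omega))
      rw [pow_succ]
      omega

theorem testBit_lt_len (n j : Nat) (h : n.testBit j) : j < (lsbC n).length := by
  by_contra hj
  have h2 : n < 2 ^ j := lt_of_lt_of_le (lsb_lt n) (Nat.pow_le_pow_right (by omega) (by omega))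
  rw [Nat.testBit_lt_two_pow h2] at h
  exact Bool.false_ne_true h

theorem lsbC_length_pos (n : Nat) (h : n ≠ 0) : 0 < (lsbC n).length := by
  rw [lsbC, dif_neg h]
  simp

-- running sums of a list starting from s
def scanS (s : Int) : List Int → List Int
  | [] => []
  | e :: t => (s + e) :: scanS (s + e) t

theorem scanS_append (s : Int) (l1 l2 : List Int) :
    scanS s (l1 ++ l2) = scanS s l1 ++ scanS (s + l1.sum) l2 := by
  induction l1 generalizing s with
  | nil => simp [scanS]
  | cons e t ih => simp [scanS, ih, add_assoc]

-- on a strictly increasing list, the k-th running sum is the sum of the elements ≤ the k-th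
theorem scanS_pairwise (a : Int) (l : List Int) (h : l.Pairwise (· < ·)) :
    scanS a l = l.map (fun e => a + (l.filter (fun y => decide (y ≤ e))).sum) := by
  induction l generalizing a with
  | nil => simp [scanS]
  | cons x t ih =>
    rw [List.pairwise_cons] at h
    obtain ⟨hx, ht⟩ := h
    have hxfilt : t.filter (fun y => decide (y ≤ x)) = [] := by
      rw [List.filter_eq_nil_iff]
      intro y hy
      simpa using not_le.mpr (hx y hy)
    simp only [scanS, List.map_cons]
    congr 1
    · rw [List.filter_cons_of_pos (by simp), hxfilt]
      simp
    · rw [ih (a + x) ht]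
      apply List.map_congr_left
      intro e he
      rw [List.filter_cons_of_pos (by simp [le_of_lt (hx e he)])]
      simp only [List.sum_cons]
      ring

-- A's append-running-sum loop over an index list, as filter/map + scanS
theorem loop_scan (p : Int → Bool) (dec : Int → Int) (I : List Int) (s : Int) (rs : List Int) :
    I.foldl (fun (st : Int × List Int) i =>
        if p i then (st.1 + dec i, st.2 ++ [st.1 + dec i]) else st) (s, rs)
      = (s + ((I.filter p).map dec).sum, rs ++ scanS s ((I.filter p).map dec)) := by
  induction I generalizing s rs with
  | nil => simp [scanS]
  | cons i t ih =>
    by_cases h : p i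
    · simp only [List.foldl_cons, if_pos h, List.filter_cons_of_pos h, List.map_cons,
        List.sum_cons, scanS, ih]
      rw [Prod.mk.injEq]
      exact ⟨by ring, by simp⟩
    · simp [List.foldl_cons, if_neg h, List.filter_cons_of_neg h, ih]

-- B's conditional-add inner loop, as a sum over the filtered list
theorem foldl_add_if (p : Nat → Prop) [DecidablePred p] (f : Nat → Int) (l : List Nat) (s : Int) :
    l.foldl (fun s j => if p j then s + f j else s) s
      = s + ((l.filter (fun j => decide (p j))).map f).sum := by
  induction l generalizing s with
  | nil => simp
  | cons i t ih =>
    by_cases h : p i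
    · rw [List.foldl_cons, if_pos h, List.filter_cons_of_pos (by simpa using h)]
      rw [ih]
      simp only [List.map_cons, List.sum_cons]
      ring
    · rw [List.foldl_cons, if_neg h, List.filter_cons_of_neg (by simpa using h), ih]

-- B's conditional outer loop, as a fold over the filtered list
theorem foldl_or_if {β : Type} (p : Nat → Prop) [DecidablePred p] (g : β → Nat → β)
    (l : List Nat) (b : β) :
    l.foldl (fun x j => if p j then g x j else x) b
      = (l.filter (fun j => decide (p j))).foldl g b := by
  induction l generalizing b with
  | nil => rfl
  | cons i t ih =>
    by_cases h : p i
    · rw [List.foldl_cons, if_pos h, List.filter_cons_of_pos (by simpa using h),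
        List.foldl_cons, ih]
    · rw [List.foldl_cons, if_neg h, List.filter_cons_of_neg (by simpa using h), ih]

-- the bit test of B's port is Nat.testBit
theorem shift_and_one (m j : Nat) : ((m >>> j) &&& 1 = 1) ↔ m.testBit j := by
  rw [Nat.and_one_is_mod]
  simp [Nat.testBit, Nat.one_and_eq_mod_two]

theorem pvBitLen_lt (n : Nat) : n < 2 ^ pvBitLen n := by
  induction n using Nat.strong_induction_on with
  | _ n ih =>
    rw [pvBitLen]
    by_cases h : n = 0
    · simp [h]
    · simp only [dif_neg h]
      have := ih (n/2) (Nat.div_lt_self (Nat.pos_of_ne_zero h) (by omega))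
      rw [pow_succ]
      omega

theorem testBit_lt_bitLen (n j : Nat) (h : n.testBit j) : j < pvBitLen n := by
  by_contra hj
  have h2 : n < 2 ^ j := lt_of_lt_of_le (pvBitLen_lt n) (Nat.pow_le_pow_right (by omega) (by omega))
  rw [Nat.testBit_lt_two_pow h2] at h
  exact Bool.false_ne_true h

-- the element list produced by B's outer scan, and its membership / nodup facts
theorem mem_CB (m : Nat) (x : Int) :
    x ∈ ((List.range (pvBitLen m)).filter
          (fun j => decide ((m >>> j) &&& 1 = 1))).map pvDecode
      ↔ m.testBit (zigN x) := by
  simp only [List.mem_map, List.mem_filter, List.mem_range, decide_eq_true_eq]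
  constructor
  · rintro ⟨j, ⟨_, hb⟩, rfl⟩
    rw [zig_dec]
    exact (shift_and_one m j).mp hb
  · intro hb
    exact ⟨zigN x, ⟨testBit_lt_bitLen m _ hb, (shift_and_one m _).mpr hb⟩, dec_zig x⟩

theorem nodup_CB (m : Nat) :
    (((List.range (pvBitLen m)).filter
        (fun j => decide ((m >>> j) &&& 1 = 1))).map pvDecode).Nodup :=
  ((List.nodup_range).filter _).map pvDecode_inj

-- reading the reversed binary string (plus a possible non-digit tail) at a nonnegative index
theorem sget (m : Nat) (pad : List Char) (hpad : ∀ c ∈ pad, c ≠ '1') (i : Int) (hi : 0 ≤ i) :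
    ((PySem.List.pyGet? (lsbC m ++ pad) i == some '1') = true) ↔ m.testBit i.toNat := by
  obtain ⟨j, rfl⟩ : ∃ j : Nat, i = (j : Int) := ⟨i.toNat, (Int.toNat_of_nonneg hi).symm⟩
  rw [beq_iff_eq, PySem.List.pyGet?_natCast, Int.toNat_natCast]
  by_cases hj : j < (lsbC m).length
  · rw [List.getElem?_append_left hj, lsb_get1]
  · constructor
    · intro h
      rw [List.getElem?_append_right (by omega)] at h
      have hc : '1' ∈ pad := List.mem_of_getElem? h
      exact absurd rfl (hpad _ hc)
    · intro h
      exact absurd (testBit_lt_len m _ h) hj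

-- the negative-elements pass of A, characterized
theorem mem_negE (m k : Nat) (pad : List Char) (hpad : ∀ c ∈ pad, c ≠ '1')
    (hk2 : (lsbC m).length ≤ 2*k + 1) (x : Int) :
    (x ∈ ((List.range k).filter
        (fun j => PySem.List.pyGet? (lsbC m ++ pad) (2*(k:Int)-1-2*(j:Nat)) == some '1')).map
        (fun (j : Nat) => (j:Int) - k))
      ↔ x < 0 ∧ m.testBit (zigN x) := by
  simp only [List.mem_map, List.mem_filter, List.mem_range]
  constructor
  · rintro ⟨j, ⟨hjk, hp⟩, rfl⟩
    have hge : (0:Int) ≤ 2*(k:Int)-1-2*(j:Nat) := by omega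
    rw [sget m pad hpad _ hge] at hp
    refine ⟨by omega, ?_⟩
    have : zigN ((j:Int) - k) = (2*(k:Int)-1-2*(j:Nat)).toNat := by
      unfold zigN; split_ifs <;> omega
    rw [this]; exact hp
  · rintro ⟨hx, hb⟩
    have hlen : zigN x < (lsbC m).length := testBit_lt_len m _ hb
    have hzig : zigN x = (-2*x-1).toNat := by unfold zigN; rw [if_neg (by omega)]
    have hxk : -(k:Int) ≤ x := by omega
    refine ⟨(x + k).toNat, ⟨by omega, ?_⟩, by omega⟩
    have harg : 2*(k:Int)-1-2*((x + k).toNat : Nat) = -2*x-1 := by omega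
    rw [harg, sget m pad hpad _ (by omega)]
    rw [hzig] at hb
    exact hb

-- the nonnegative-elements pass of A, characterized
theorem mem_posE (m q : Nat) (pad : List Char) (hpad : ∀ c ∈ pad, c ≠ '1')
    (hq : (lsbC m).length ≤ 2*q) (x : Int) :
    (x ∈ ((List.range q).filter
        (fun j => PySem.List.pyGet? (lsbC m ++ pad) (2*((j:Nat):Int)) == some '1')).map
        (fun (j : Nat) => ((j:Int))))
      ↔ 0 ≤ x ∧ m.testBit (zigN x) := by
  simp only [List.mem_map, List.mem_filter, List.mem_range]
  constructor
  · rintro ⟨j, ⟨hjq, hp⟩, rfl⟩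
    rw [sget m pad hpad _ (by omega)] at hp
    refine ⟨by omega, ?_⟩
    have : zigN (j:Int) = (2*((j:Nat):Int)).toNat := by unfold zigN; rw [if_pos (by omega)]
    rw [this]; exact hp
  · rintro ⟨hx, hb⟩
    have hlen : zigN x < (lsbC m).length := testBit_lt_len m _ hb
    have hzig : zigN x = (2*x).toNat := by unfold zigN; rw [if_pos hx]
    refine ⟨x.toNat, ⟨by omega, ?_⟩, by omega⟩
    rw [sget m pad hpad _ (by omega)]
    rw [hzig] at hb
    convert hb using 2
    omega

-- A's element order (negatives ascending, then nonnegatives) is strictly increasing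
theorem E_pairwise (m k q : Nat) (pad : List Char) (hpad : ∀ c ∈ pad, c ≠ '1')
    (hk2 : (lsbC m).length ≤ 2*k + 1) (hq : (lsbC m).length ≤ 2*q) :
    (((List.range k).filter
        (fun j => PySem.List.pyGet? (lsbC m ++ pad) (2*(k:Int)-1-2*(j:Nat)) == some '1')).map
        (fun (j : Nat) => (j:Int) - k)
      ++ ((List.range q).filter
        (fun j => PySem.List.pyGet? (lsbC m ++ pad) (2*((j:Nat):Int)) == some '1')).map
        (fun (j : Nat) => ((j:Int)))).Pairwise (· < ·) := by
  have hpairN : (((List.range k).filter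
      (fun j => PySem.List.pyGet? (lsbC m ++ pad) (2*(k:Int)-1-2*(j:Nat)) == some '1')).map
      (fun (j : Nat) => (j:Int) - k)).Pairwise (· < ·) := by
    rw [List.pairwise_map]
    exact (List.pairwise_lt_range.filter _).imp (by intro a b h; omega)
  have hpairP : (((List.range q).filter
      (fun j => PySem.List.pyGet? (lsbC m ++ pad) (2*((j:Nat):Int)) == some '1')).map
      (fun (j : Nat) => ((j:Int)))).Pairwise (· < ·) := by
    rw [List.pairwise_map]
    exact (List.pairwise_lt_range.filter _).imp (by intro a b h; omega)
  rw [List.pairwise_append]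
  refine ⟨hpairN, hpairP, ?_⟩
  intro x hx y hy
  have h1 := (mem_negE m k pad hpad hk2 x).mp hx
  have h2 := (mem_posE m q pad hpad hq y).mp hy
  omega

-- ===== the encode stage =====

-- LSB-first value of a 0/1 digit list
def natVal : List Int → Nat
  | [] => 0
  | d :: t => d.toNat + 2 * natVal t

theorem natVal_lt (bc : List Int) (h : ∀ x ∈ bc, x = 0 ∨ x = 1) :
    natVal bc < 2 ^ bc.length := by
  induction bc with
  | nil => simp [natVal]
  | cons d t ih =>
    have hd := h d (by simp)
    have ht := ih (fun x hx => h x (by simp [hx]))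
    simp only [natVal, List.length_cons, pow_succ]
    omega

theorem testBit_natVal (bc : List Int) (h : ∀ x ∈ bc, x = 0 ∨ x = 1) (j : Nat) :
    (natVal bc).testBit j = true ↔ bc[j]? = some 1 := by
  induction bc generalizing j with
  | nil => simp [natVal]
  | cons d t ih =>
    have hd := h d (by simp)
    have ht := fun x hx => h x (List.mem_cons_of_mem _ hx)
    cases j with
    | zero =>
      simp only [natVal, Nat.testBit_zero, List.getElem?_cons_zero]
      rcases hd with rfl | rfl <;> simp
    | succ j =>
      simp only [natVal, Nat.testBit_succ, List.getElem?_cons_succ]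
      have hdiv : (d.toNat + 2 * natVal t) / 2 = natVal t := by
        rcases hd with rfl | rfl <;> omega
      rw [hdiv]
      exact ih ht j

-- str(x) for x ∈ {0,1}
theorem toChars01 (x : Int) (h : x = 0 ∨ x = 1) :
    PySem.Int.toChars x = [if x = 1 then '1' else '0'] := by
  rcases h with rfl | rfl <;> decide

theorem join_digits (bc : List Int) (h : ∀ x ∈ bc, x = 0 ∨ x = 1) :
    (PySem.Str.join "" (bc.map (fun x => PySem.Int.toStr x))).toList
      = bc.map (fun x => if x = 1 then '1' else '0') := by
  rw [PySem.Str.join]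
  have hmaps : (List.map String.toList (bc.map (fun x => PySem.Int.toStr x)))
      = (bc.map (fun x => if x = 1 then '1' else '0')).map (fun c => [c]) := by
    simp only [List.map_map, List.map_inj_left]
    intro x hx
    simp only [Function.comp_apply, PySem.Int.toList_toStr]
    exact toChars01 x (h x hx)
  rw [hmaps]
  have hsep : ("" : String).toList = [] := rfl
  rw [hsep, PySem.Chars.join_nil_singletons, String.toList_ofList]

theorem parse_rev (bc : List Int) (h : ∀ x ∈ bc, x = 0 ∨ x = 1) :
    pvParseBin ((bc.reverse).map (fun x => if x = 1 then '1' else '0')) = (natVal bc : Int) := by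
  induction bc with
  | nil => simp [pvParseBin, natVal]
  | cons d t ih =>
    have hd := h d (by simp)
    have ht := fun x hx => h x (List.mem_cons_of_mem _ hx)
    simp only [List.reverse_cons, List.map_append, List.map_cons, List.map_nil]
    unfold pvParseBin
    rw [List.foldl_append]
    have := ih ht
    unfold pvParseBin at this
    rw [this]
    simp only [natVal, List.foldl_cons, List.foldl_nil]
    rcases hd with rfl | rfl <;> simp <;> ring

theorem setfold_length (l : List Int) (bc : List Int) (hl : ∀ i ∈ l, 0 ≤ i) :
    (l.foldl (fun b i => PySem.List.pySetD b i 1) bc).length = bc.length := by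
  induction l generalizing bc with
  | nil => rfl
  | cons i t ih =>
    simp only [List.foldl_cons]
    rw [ih _ (fun x hx => hl x (by simp [hx])),
      PySem.List.pySetD_of_nonneg _ _ (hl i (by simp)), List.length_set]

theorem setfold_mem01 (l : List Int) (bc : List Int) (hl : ∀ i ∈ l, 0 ≤ i)
    (hbc : ∀ x ∈ bc, x = 0 ∨ x = 1) :
    ∀ x ∈ l.foldl (fun b i => PySem.List.pySetD b i 1) bc, x = 0 ∨ x = 1 := by
  induction l generalizing bc with
  | nil => exact hbc
  | cons i t ih =>
    simp only [List.foldl_cons]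
    refine ih _ (fun x hx => hl x (by simp [hx])) ?_
    rw [PySem.List.pySetD_of_nonneg _ _ (hl i (by simp))]
    intro x hx
    rcases List.mem_or_eq_of_mem_set hx with h | rfl
    · exact hbc x h
    · right; rfl

theorem setfold_getElem? (l : List Int) (bc : List Int) (hl : ∀ i ∈ l, 0 ≤ i)
    (hlen : ∀ i ∈ l, i < (bc.length : Int)) (j : Nat) :
    (l.foldl (fun b i => PySem.List.pySetD b i 1) bc)[j]?
      = if (j : Int) ∈ l then some 1 else bc[j]? := by
  induction l generalizing bc with
  | nil => simp
  | cons i t ih =>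
    have hi : 0 ≤ i := hl i (by simp)
    simp only [List.foldl_cons]
    rw [PySem.List.pySetD_of_nonneg _ _ hi,
      ih _ (fun x hx => hl x (by simp [hx]))
        (fun x hx => by rw [List.length_set]; exact hlen x (by simp [hx]))]
    by_cases hm : (j : Int) ∈ t
    · rw [if_pos hm, if_pos (by simp [hm])]
    · rw [if_neg hm, List.getElem?_set]
      by_cases hji : i.toNat = j
      · have hji' : (j:Int) = i := by omega
        rw [if_pos hji, if_pos (by have := hlen i (by simp); omega),
          if_pos (by simp [hji'])]
      · have hji' : ¬ (j:Int) = i := by omega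
        rw [if_neg hji, if_neg (by simp [hji', hm])]

theorem testBit_orfold (l : List Nat) (a : Nat) (t : Nat) :
    (l.foldl (fun x j => x ||| 2 ^ j) a).testBit t = (a.testBit t || decide (t ∈ l)) := by
  induction l generalizing a with
  | nil => simp
  | cons j r ih =>
    simp only [List.foldl_cons, ih, Nat.testBit_lor, Nat.testBit_two_pow, List.mem_cons]
    by_cases h : j = t
    · simp [h]
    · have ht : ¬ t = j := fun hc => h hc.symm
      simp [h, ht]

theorem borfold_natCast (rs : List Int) (f : Int → Nat) (a : Nat) :
    rs.foldl (fun acc t => PySem.Int.bor acc ((2:Int) ^ f t)) (a : Int)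
      = ((rs.map f).foldl (fun x j => x ||| 2 ^ j) a : Nat) := by
  induction rs generalizing a with
  | nil => rfl
  | cons e r ih =>
    simp only [List.foldl_cons, List.map_cons]
    have h2 : (2:Int) ^ f e = ((2 ^ f e : Nat) : Int) := by push_cast; ring
    rw [h2, PySem.Int.bor_natCast, ih]

theorem pw_eq_zig (t : Int) :
    (if 0 ≤ t then (2:Int) ^ (2*t).toNat else (2:Int) ^ (-2*t-1).toNat) = (2:Int) ^ (zigN t) := by
  unfold zigN; split_ifs <;> rfl

-- A's whole encode stage equals an OR fold, for ANY running-sum list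
theorem encodeA_eq_or (rs : List Int) :
    pvEncodeA rs = rs.foldl (fun acc t => PySem.Int.bor acc
      (if 0 ≤ t then (2:Int) ^ (2*t).toNat else (2:Int) ^ (-2*t-1).toNat)) 0 := by
  simp only [pw_eq_zig]
  rw [show ((0:Int) = ((0:Nat) : Int)) from rfl, borfold_natCast]
  unfold pvEncodeA
  have hstep : (fun (acc : List Int) (i : Int) =>
      if 0 ≤ i then acc ++ [2 * i] else acc ++ [-2 * i - 1])
      = (fun acc i => acc ++ [(zigN i : Int)]) := by
    funext acc i
    unfold zigN
    split_ifs <;> simp <;> omega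
  rw [hstep]
  dsimp only
  rw [PySem.List.foldl_append_singleton_eq_map]
  simp only [List.nil_append]
  set S : List Int := PySem.Set.ofList rs with hS
  have hSmem : ∀ x, x ∈ S ↔ x ∈ rs := fun x => PySem.Set.mem_ofList rs x
  by_cases hrs : rs = []
  · subst hrs
    have : S = [] := by rw [hS]; rfl
    rw [this]
    simp
  · have hSne : S ≠ [] := by
      intro h
      rcases List.exists_mem_of_ne_nil rs hrs with ⟨x, hx⟩
      have := (hSmem x).mpr hx
      simp [h] at this
    have hbne : S.map (fun i => (zigN i : Int)) ≠ [] := by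
      simpa using hSne
    rw [if_neg hbne]
    obtain ⟨mx, hmx⟩ : ∃ mx, PySem.List.max? (S.map (fun i => (zigN i : Int))) (fun x => x) = some mx := by
      cases h : PySem.List.max? (S.map (fun i => (zigN i : Int))) (fun x => x) with
      | none => exact absurd ((PySem.List.max?_eq_none_iff _ _).mp h) hbne
      | some mx => exact ⟨mx, rfl⟩
    rw [hmx]
    simp only [Option.getD_some]
    have hmax : ∀ y ∈ S.map (fun i => (zigN i : Int)), y ≤ mx :=
      PySem.List.max?_isMax hmx
    have hmx0 : 0 ≤ mx := by
      rcases List.exists_mem_of_ne_nil _ hbne with ⟨y, hy⟩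
      have := hmax y hy
      rcases List.mem_map.mp hy with ⟨u, _, rfl⟩
      omega
    set bi : List Int := S.map (fun i => (zigN i : Int)) with hbi
    set z : Nat := (mx + 1).toNat with hz
    have hbc0len : (List.replicate z (0:Int)).length = z := by simp
    have hipos : ∀ i ∈ bi, 0 ≤ i := by
      intro i hi; rcases List.mem_map.mp hi with ⟨u, _, rfl⟩; omega
    have hilen : ∀ i ∈ bi, i < ((List.replicate z (0:Int)).length : Int) := by
      intro i hi
      have := hmax i hi
      rw [hbc0len]
      omega
    set bc1 := bi.foldl (fun bc i => PySem.List.pySetD bc i 1) (List.replicate z (0:Int)) with hbc1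
    have h01 : ∀ x ∈ bc1, x = 0 ∨ x = 1 := by
      refine setfold_mem01 bi _ hipos ?_
      intro x hx
      left
      exact List.eq_of_mem_replicate hx
    have hlen1 : bc1.length = z := by rw [hbc1, setfold_length bi _ hipos, hbc0len]
    rw [PySem.List.slice?_none_none_neg_one]
    simp only [Option.getD_some]
    have h01r : ∀ x ∈ bc1.reverse, x = 0 ∨ x = 1 := by
      intro x hx; exact h01 x (List.mem_reverse.mp hx)
    rw [join_digits _ h01r]
    rw [parse_rev bc1 h01]
    congr 1
    apply Nat.eq_of_testBit_eq
    intro t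
    rw [testBit_orfold]
    simp only [Bool.false_or, Nat.zero_testBit]
    by_cases ht : t < z
    · have hchar := setfold_getElem? bi (List.replicate z (0:Int)) hipos hilen t
      rw [← hbc1] at hchar
      by_cases hmem : (t : Int) ∈ bi
      · have hb1 : bc1[t]? = some 1 := by rw [hchar, if_pos hmem]
        have hT : (natVal bc1).testBit t = true := (testBit_natVal bc1 h01 t).mpr hb1
        rw [hT]
        rcases List.mem_map.mp ((hbi ▸ hmem : (t:Int) ∈ S.map (fun i => (zigN i : Int)))) with ⟨u, hu, hut⟩
        have : t ∈ rs.map zigN := List.mem_map.mpr ⟨u, (hSmem u).mp hu, by omega⟩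
        simp [this]
      · have hb0 : bc1[t]? = some 0 := by
          rw [hchar, if_neg hmem, List.getElem?_replicate, if_pos ht]
        have hf : (natVal bc1).testBit t = false := by
          rw [← Bool.not_eq_true]
          intro hc
          have := (testBit_natVal bc1 h01 t).mp hc
          rw [hb0] at this
          simp at this
        rw [hf]
        have : t ∉ rs.map zigN := by
          intro hc
          rcases List.mem_map.mp hc with ⟨u, hu, rfl⟩
          exact hmem (hbi ▸ List.mem_map.mpr ⟨u, (hSmem u).mpr hu, rfl⟩)
        simp [this]
    · have hf : (natVal bc1).testBit t = false := by
        apply Nat.testBit_lt_two_pow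
        calc natVal bc1 < 2 ^ bc1.length := natVal_lt bc1 h01
        _ ≤ 2 ^ t := Nat.pow_le_pow_right (by omega) (by omega)
      rw [hf]
      have : t ∉ rs.map zigN := by
        intro hc
        rcases List.mem_map.mp hc with ⟨u, hu, rfl⟩
        have hin : ((zigN u : Int)) ∈ bi := hbi ▸ List.mem_map.mpr ⟨u, (hSmem u).mpr hu, rfl⟩
        have := hmax _ hin
        omega
      simp [this]

-- ===== the decode stage of A: bin(n)[2:][::-1] =====
theorem slice_two {a b : Char} (rest : List Char) :
    PySem.List.slice (a :: b :: rest) (some 2) none = rest := by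
  simp [PySem.List.slice, PySem.List.clampIdx]

theorem pvStr_spec (n : Int) (hn : n ≠ 0) :
    pvStr n = lsbC n.natAbs ++ (if n < 0 then ['b'] else []) := by
  unfold pvStr pvBinChars
  by_cases h : n < 0
  · rw [if_pos h, if_pos h, slice_two, PySem.List.slice?_none_none_neg_one]
    simp [msb_rev]
  · rw [if_neg h, if_neg h, if_neg hn, slice_two, PySem.List.slice?_none_none_neg_one]
    simp only [Option.getD_some, List.append_nil]
    rw [msb_rev]
    congr 1
    omega

-- pyRange with step -2 down from an odd start, and with step 2 up from 0
theorem pyRange_odd_desc (k : Nat) :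
    PySem.List.pyRange ((k:Int)*2-1) (-1) (-2)
      = (List.range k).map (fun (j : Nat) => 2*(k:Int)-1 - 2*(j:Int)) := by
  rw [PySem.List.pyRange]
  rcases Nat.eq_zero_or_pos k with h | h
  · subst h; decide
  · rw [if_neg (by norm_num), if_neg (by norm_num), if_pos (by omega)]
    have hc : (((k:Int)*2-1 - (-1) + -(-2) - 1) / -(-2)).toNat = k := by norm_num; omega
    rw [hc]
    exact List.map_congr_left (fun j hj => by ring)

theorem pyRange_even_asc (L : Int) (hL : 0 < L) :
    PySem.List.pyRange 0 L 2 = (List.range ((L+1)/2).toNat).map (fun (j : Nat) => 2*(j:Int)) := by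
  rw [PySem.List.pyRange]
  rw [if_neg (by norm_num), if_pos (by norm_num), if_pos hL]
  have hc : ((L - 0 + 2 - 1) / 2).toNat = ((L+1)/2).toNat := by omega
  rw [hc]
  exact List.map_congr_left (fun j hj => by ring)

-- ===== VERDICT (by name: the statement is the Claim_ definition above) =====
set_option maxHeartbeats 2000000 in
theorem code_derived_set_spec : Claim_equal_code_derived_set := by
  intro n _
  unfold Spec_code_derived_set
  by_cases h0 : n = 0
  · subst h0
    have hA0 : code_derived_set 0 = 0 := by decide
    have hB0 : code_derived_set_alt 0 = 0 := by
      have hb : pvBitLen 0 = 0 := by rw [pvBitLen]; simp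
      rw [code_derived_set_alt]
      simp [hb]
    rw [hA0, hB0]
  · -- notation
    obtain ⟨m, hmdef⟩ : ∃ m : Nat, m = n.natAbs := ⟨_, rfl⟩
    have hm0 : m ≠ 0 := by omega
    obtain ⟨pad, hpaddef⟩ : ∃ pad : List Char, pad = if n < 0 then ['b'] else [] := ⟨_, rfl⟩
    have hpad : ∀ c ∈ pad, c ≠ '1' := by
      rw [hpaddef]; split_ifs <;> intro c hc <;> simp at hc
      subst hc; decide
    have hpadlen : pad.length ≤ 1 := by rw [hpaddef]; split_ifs <;> simp
    have hs : pvStr n = lsbC m ++ pad := by rw [hpaddef, hmdef]; exact pvStr_spec n h0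
    have hL0 : 0 < (lsbC m).length := lsbC_length_pos m hm0
    obtain ⟨k, hkdef⟩ : ∃ k : Nat, k = (lsbC m ++ pad).length / 2 := ⟨_, rfl⟩
    obtain ⟨q, hqdef⟩ : ∃ q : Nat, q = ((lsbC m ++ pad).length + 1) / 2 := ⟨_, rfl⟩
    have hlen : (lsbC m ++ pad).length = (lsbC m).length + pad.length := by simp
    have hk2 : (lsbC m).length ≤ 2*k + 1 := by omega
    have hq' : (lsbC m).length ≤ 2*q := by omega
    -- the two element lists produced by A's passes
    have hE1 : ((((List.range k).map (fun (j:Nat) => 2*(k:Int)-1 - 2*(j:Int))).filter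
          (fun i => PySem.List.pyGet? (lsbC m ++ pad) i == some '1')).map
          (fun i => PySem.Int.floordiv (-(i + 1)) 2))
        = ((List.range k).filter
          (fun j => PySem.List.pyGet? (lsbC m ++ pad) (2*(k:Int)-1-2*(j:Nat)) == some '1')).map
          (fun (j : Nat) => (j:Int) - k) := by
      rw [List.filter_map, List.map_map]
      simp only [Function.comp_def]
      exact List.map_congr_left (fun j hj => by
        rw [PySem.Int.floordiv_eq_ediv_of_pos (by norm_num)]; omega)
    have hE2 : ((((List.range q).map (fun (j:Nat) => 2*(j:Int))).filter
          (fun i => PySem.List.pyGet? (lsbC m ++ pad) i == some '1')).map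
          (fun i => PySem.Int.floordiv i 2))
        = ((List.range q).filter
          (fun j => PySem.List.pyGet? (lsbC m ++ pad) (2*((j:Nat):Int)) == some '1')).map
          (fun (j : Nat) => ((j:Int))) := by
      rw [List.filter_map, List.map_map]
      simp only [Function.comp_def]
      exact List.map_congr_left (fun j hj => by
        rw [PySem.Int.floordiv_eq_ediv_of_pos (by norm_num)]; omega)
    -- name A's element list E (negatives ascending, then nonnegatives)
    obtain ⟨E, hEdef⟩ : ∃ E : List Int,
        E = ((List.range k).filter
            (fun j => PySem.List.pyGet? (lsbC m ++ pad) (2*(k:Int)-1-2*(j:Nat)) == some '1')).map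
            (fun (j : Nat) => (j:Int) - k)
          ++ ((List.range q).filter
            (fun j => PySem.List.pyGet? (lsbC m ++ pad) (2*((j:Nat):Int)) == some '1')).map
            (fun (j : Nat) => ((j:Int))) := ⟨_, rfl⟩
    have hEpair : E.Pairwise (· < ·) := hEdef ▸ E_pairwise m k q pad hpad hk2 hq'
    have hEmem : ∀ x, x ∈ E ↔ m.testBit (zigN x) := by
      intro x
      rw [hEdef, List.mem_append, mem_negE m k pad hpad hk2 x, mem_posE m q pad hpad hq' x]
      constructor
      · rintro (⟨_, h⟩ | ⟨_, h⟩) <;> exact h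
      · intro h
        rcases lt_or_ge x 0 with hx | hx
        · exact Or.inl ⟨hx, h⟩
        · exact Or.inr ⟨hx, h⟩
    -- name B's element list C
    obtain ⟨C, hCdef⟩ : ∃ C : List Int,
        C = ((List.range (pvBitLen m)).filter
            (fun j => decide ((m >>> j) &&& 1 = 1))).map pvDecode := ⟨_, rfl⟩
    have hCmem : ∀ x, x ∈ C ↔ m.testBit (zigN x) := fun x => hCdef ▸ mem_CB m x
    have hperm : E.Perm C := by
      rw [List.perm_ext_iff_of_nodup (hEpair.imp ne_of_lt) (hCdef ▸ nodup_CB m)]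
      intro x
      rw [hEmem x, hCmem x]
    -- A side: the loops produce the running sums of E
    have hA : code_derived_set n = pvEncodeA (scanS 0 E) := by
      unfold code_derived_set pvLoops
      rw [hs]
      dsimp only
      have hfd : PySem.Int.floordiv (((lsbC m ++ pad).length : Nat) : Int) 2 = (k : Int) := by
        rw [hkdef]; exact_mod_cast PySem.Int.floordiv_natCast (lsbC m ++ pad).length 2
      rw [hfd, pyRange_odd_desc k,
        pyRange_even_asc (((lsbC m ++ pad).length : Nat) : Int) (by exact_mod_cast (by omega : 0 < (lsbC m ++ pad).length)),
        (by omega : (((((lsbC m ++ pad).length : Nat) : Int)+1)/2).toNat = q)]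
      rw [loop_scan (fun i => PySem.List.pyGet? (lsbC m ++ pad) i == some '1')
        (fun i => PySem.Int.floordiv (-(i + 1)) 2) _ 0 []]
      rw [loop_scan (fun i => PySem.List.pyGet? (lsbC m ++ pad) i == some '1')
        (fun i => PySem.Int.floordiv i 2)]
      dsimp only
      rw [List.nil_append, hE1, hE2, ← scanS_append, ← hEdef]
    -- B side: B is the OR fold over C of the independent ≤-sums
    have hB : code_derived_set_alt n
        = C.foldl (fun res e => PySem.Int.bor res
            ((2:Int) ^ zigN ((C.filter (fun y => decide (y ≤ e))).sum))) 0 := by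
      have hs : ∀ e : Int,
          (List.range (pvBitLen m)).foldl
            (fun s j => if (m >>> j) &&& 1 = 1 ∧ pvDecode j ≤ e then s + pvDecode j else s) 0
          = (C.filter (fun y => decide (y ≤ e))).sum := by
        intro e
        rw [foldl_add_if (fun j => (m >>> j) &&& 1 = 1 ∧ pvDecode j ≤ e) pvDecode, zero_add,
          hCdef, List.filter_map, List.filter_filter]
        have hpt : (List.range (pvBitLen m)).filter
              (fun j => decide ((m >>> j) &&& 1 = 1 ∧ pvDecode j ≤ e))
            = (List.range (pvBitLen m)).filter
              (fun j => ((fun y => decide (y ≤ e)) ∘ pvDecode) j && decide ((m >>> j) &&& 1 = 1)) := by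
          apply List.filter_congr
          intro j _
          by_cases hA : (m >>> j) &&& 1 = 1 <;> by_cases hB : pvDecode j ≤ e <;>
            simp [hA, hB, Function.comp]
        rw [hpt]
      unfold code_derived_set_alt
      rw [← hmdef]
      dsimp only
      refine .trans (List.foldl_ext _
        (fun (res : Int) (i : Nat) =>
          if (m >>> i) &&& 1 = 1 then
            PySem.Int.bor res ((2:Int) ^ zigN ((C.filter (fun y => decide (y ≤ pvDecode i))).sum))
          else res) 0 ?_) ?_
      · intro res i _
        dsimp only
        by_cases hc : (m >>> i) &&& 1 = 1
        · rw [if_pos hc, if_pos hc, hs (pvDecode i), pw_eq_zig]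
        · rw [if_neg hc, if_neg hc]
      · rw [foldl_or_if (fun i => (m >>> i) &&& 1 = 1)
          (fun res i => PySem.Int.bor res ((2:Int) ^ zigN ((C.filter (fun y => decide (y ≤ pvDecode i))).sum))) _ 0]
        rw [show ((List.range (pvBitLen m)).filter (fun j => decide ((m >>> j) &&& 1 = 1))).foldl
              (fun res i => PySem.Int.bor res ((2:Int) ^ zigN ((C.filter (fun y => decide (y ≤ pvDecode i))).sum))) 0
            = (((List.range (pvBitLen m)).filter (fun j => decide ((m >>> j) &&& 1 = 1))).map pvDecode).foldl
              (fun res e => PySem.Int.bor res ((2:Int) ^ zigN ((C.filter (fun y => decide (y ≤ e))).sum))) 0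
            from (List.foldl_map (f := pvDecode)
              (g := fun (res : Int) (e : Int) => PySem.Int.bor res ((2:Int) ^ zigN ((C.filter (fun y => decide (y ≤ e))).sum)))).symm]
        rw [← hCdef]
    -- the two exponent lists have the same members
    have hsum : ∀ e : Int, (E.filter (fun y => decide (y ≤ e))).sum
        = (C.filter (fun y => decide (y ≤ e))).sum :=
      fun e => (hperm.filter _).sum_eq
    have hscan : scanS 0 E = E.map (fun e => (C.filter (fun y => decide (y ≤ e))).sum) := by
      rw [scanS_pairwise 0 E hEpair]
      exact List.map_congr_left (fun e he => by rw [zero_add, hsum e])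
    -- finish: both sides are Nat OR folds over lists with the same members
    rw [hA, hB, encodeA_eq_or]
    simp only [pw_eq_zig]
    rw [show ((0:Int) = ((0:Nat) : Int)) from rfl, borfold_natCast, borfold_natCast]
    refine congrArg (fun x : Nat => (x : Int)) ?_
    apply Nat.eq_of_testBit_eq
    intro t
    rw [testBit_orfold, testBit_orfold]
    simp only [Nat.zero_testBit, Bool.false_or, decide_eq_decide]
    simp only [Nat.cast_zero]
    rw [hscan, List.map_map]
    constructor
    · rintro hmem
      rcases List.mem_map.mp hmem with ⟨e, he, rfl⟩
      exact List.mem_map.mpr ⟨e, hperm.mem_iff.mp he, rfl⟩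
    · rintro hmem
      rcases List.mem_map.mp hmem with ⟨e, he, rfl⟩
      exact List.mem_map.mpr ⟨e, hperm.mem_iff.mpr he, rfl⟩
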